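-- pv_equiv track=rewrite | github.com/NotBobTheBuilder/advent-of-code | 2020/08.py | run_until_cycle
-- ===== SOURCE A (Python) =====
-- def run_until_cycle(program):
--     seen_ops = set()
--     op_idx = 0
--     acc = 0
--
--     while op_idx < len(program) and op_idx not in seen_ops:
--         seen_ops.add(op_idx)
--         op, arg = program[op_idx]
--         if op == 'nop':
--             op_idx += 1
--         if op == 'jmp':
--             op_idx += arg
--         if op == 'acc':
--             op_idx += 1
--             acc += arg
--
--     return acc, seen_ops, op_idx == len(program)
-- ===== SOURCE B (Python) =====
-- def run_until_cycle(program):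
--     # Pass 1: pure control-flow walk; record visit order (insertion order of the set).
--     seen_ops = set()
--     order = []
--     op_idx = 0
--     while op_idx < len(program) and op_idx not in seen_ops:
--         seen_ops.add(op_idx)
--         order.append(op_idx)
--         op, arg = program[op_idx]
--         if op == 'jmp':
--             op_idx += arg
--         elif op in ('nop', 'acc'):
--             op_idx += 1
--     # Pass 2: the accumulator is just the sum of the 'acc' arguments of visited instructions.
--     acc = sum(program[i][1] for i in order if program[i][0] == 'acc')
--     return acc, seen_ops, op_idx == len(program)
-- ===== Notes on version B (the rewrite author's own statement) =====
-- stated objective: alternative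
-- what changed: B separates control flow from accumulation: pass 1 walks the program maintaining only the instruction pointer and the visited set (elif branch chain), pass 2 computes acc as the sum of the 'acc' arguments over the visited indices; A computes acc inside the walk with three sequential ifs.
-- outside the precondition, e.g. on run_until_cycle([('jmp', -1), ('nop', 7)]): A returns (0, {0, -1}, False), B returns (0, {0, -1}, False)
import Mathlib
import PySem

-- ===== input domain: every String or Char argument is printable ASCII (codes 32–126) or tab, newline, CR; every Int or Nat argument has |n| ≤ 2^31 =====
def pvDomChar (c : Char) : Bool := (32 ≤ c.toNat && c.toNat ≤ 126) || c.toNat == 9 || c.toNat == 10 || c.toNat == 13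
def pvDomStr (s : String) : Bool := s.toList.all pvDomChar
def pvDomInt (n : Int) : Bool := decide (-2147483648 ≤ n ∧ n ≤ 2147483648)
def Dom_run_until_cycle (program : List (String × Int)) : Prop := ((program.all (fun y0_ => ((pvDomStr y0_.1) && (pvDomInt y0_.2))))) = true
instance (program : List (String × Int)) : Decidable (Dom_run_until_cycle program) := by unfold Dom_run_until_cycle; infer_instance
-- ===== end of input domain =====

-- B separates the walk (instruction pointer + visited set only) from the accumulation,
-- which becomes a second pass summing the 'acc' arguments over the visited indices
-- (objective: alternative decomposition, same cost).

-- ===== PORT A =====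
-- The while loop of A as fuel recursion; each iteration adds a fresh index to seen_ops,
-- and within Pre_ the indices stay in [0, len], so 2*len+2 fuel is never exhausted where
-- the Python returns.  Where program[op_idx] is out of range Python raises IndexError
-- (excluded by Pre_); there the port stops with an arbitrary sentinel.  The three
-- sequential `if`s of A are kept in order.
def run_until_cycle_loop (program : List (String × Int)) :
    Nat → Int → PySem.Set Int → Int → Int × List Int × Bool
  | 0, acc, seen, op_idx => (acc, seen, op_idx == (program.length : Int))
  | fuel+1, acc, seen, op_idx =>
      if op_idx < (program.length : Int) ∧ ¬ PySem.Set.contains seen op_idx then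
        let seen' := PySem.Set.add seen op_idx
        match PySem.List.pyGet? program op_idx with
        | none => (0, [], false)   -- Python: IndexError (outside Pre_); arbitrary sentinel
        | some (op, arg) =>
            let i1 := if op = "nop" then op_idx + 1 else op_idx
            let i2 := if op = "jmp" then i1 + arg else i1
            let st := if op = "acc" then (i2 + 1, acc + arg) else (i2, acc)
            run_until_cycle_loop program fuel st.2 seen' st.1
      else (acc, seen, op_idx == (program.length : Int))

def run_until_cycle (program : List (String × Int)) : Int × List Int × Bool :=
  run_until_cycle_loop program (2 * program.length + 2) 0 PySem.Set.empty 0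

-- ===== PORT B =====
-- Pass 1: the walk, returning only (visited set in insertion order, final index).
def run_until_cycle_walk (program : List (String × Int)) :
    Nat → PySem.Set Int → Int → PySem.Set Int × Int
  | 0, seen, op_idx => (seen, op_idx)
  | fuel+1, seen, op_idx =>
      if op_idx < (program.length : Int) ∧ ¬ PySem.Set.contains seen op_idx then
        let seen' := PySem.Set.add seen op_idx
        match PySem.List.pyGet? program op_idx with
        | none => (seen', op_idx)   -- Python: IndexError in pass 2 (outside Pre_)
        | some (op, arg) =>
            if op = "jmp" then run_until_cycle_walk program fuel seen' (op_idx + arg)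
            else if op = "nop" ∨ op = "acc" then run_until_cycle_walk program fuel seen' (op_idx + 1)
            else run_until_cycle_walk program fuel seen' op_idx
      else (seen, op_idx)

-- Pass 2: sum(program[i][1] for i in order if program[i][0] == 'acc')
def run_until_cycle_sumAcc (program : List (String × Int)) (order : List Int) : Int :=
  order.foldl (fun a i =>
    match PySem.List.pyGet? program i with
    | some (op, arg) => if op = "acc" then a + arg else a
    | none => a) 0

def run_until_cycle_alt (program : List (String × Int)) : Int × List Int × Bool :=
  let w := run_until_cycle_walk program (2 * program.length + 2) PySem.Set.empty 0
  (run_until_cycle_sumAcc program w.1, w.1, w.2 == (program.length : Int))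

-- ===== PRECONDITION & SPEC =====
-- Pre_ excludes programs holding a 'jmp' at position i with i + arg < 0: on those the walk can
-- reach a negative instruction pointer, where Python raises IndexError (below -len) or silently
-- indexes from the end of the program (above it); this closed-form per-instruction condition
-- cannot separate the raising cases from the (reachable or unreachable) end-indexing ones, so
-- it excludes them all — it is slightly narrower than the raise set (both programs still agree
-- on the excluded inputs where A returns; see the cite in the claim).
def Pre_run_until_cycle (program : List (String × Int)) : Prop :=
  ∀ x ∈ program.zipIdx, x.1.1 = "jmp" → 0 ≤ (x.2 : Int) + x.1.2
instance (program : List (String × Int)) : Decidable (Pre_run_until_cycle program) := by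
  unfold Pre_run_until_cycle; infer_instance

def pvWitness_run_until_cycle : (List (String × Int)) :=
  [("jmp", 2), ("acc", 3), ("nop", 0), ("jmp", -1), ("acc", 5)]

def Spec_run_until_cycle (program : List (String × Int)) (out : Int × List Int × Bool) : Prop := out = run_until_cycle_alt program
instance (program : List (String × Int)) (out : Int × List Int × Bool) : Decidable (Spec_run_until_cycle program out) := by unfold Spec_run_until_cycle; infer_instance

-- ===== CLAIM (what is proved, stated in full; the proofs are below) =====
def Claim_equal_run_until_cycle : Prop := ∀ (program : List (String × Int)), Dom_run_until_cycle program → Pre_run_until_cycle program → Spec_run_until_cycle program (run_until_cycle program)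

-- ===== LEMMAS AND PROOFS =====

-- Adding a fresh index to the visited set adds that instruction's 'acc' contribution to the sum.
lemma sumAcc_add (program : List (String × Int)) (seen : PySem.Set Int) (idx : Int)
    (h : idx ∉ seen) :
    run_until_cycle_sumAcc program (PySem.Set.add seen idx) =
      run_until_cycle_sumAcc program seen +
        (match PySem.List.pyGet? program idx with
         | some (op, arg) => if op = "acc" then arg else 0
         | none => 0) := by
  have hadd : PySem.Set.add seen idx = seen ++ [idx] := by simp [PySem.Set.add, h]
  rw [hadd]
  unfold run_until_cycle_sumAcc
  rw [List.foldl_append]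
  cases hg : PySem.List.pyGet? program idx with
  | none => simp [hg]
  | some p =>
    cases p with
    | mk op arg => simp only [hg, List.foldl_cons, List.foldl_nil]; split_ifs <;> simp

-- The walk/loop correspondence under Pre_: from a nonnegative instruction pointer the two
-- traversals move in lockstep (Pre_ keeps every next pointer nonnegative, so program[op_idx]
-- never raises), and A's running accumulator is B's sum over the newly visited indices.
lemma run_until_cycle_loop_eq_walk (program : List (String × Int))
    (hpre : Pre_run_until_cycle program) :
    ∀ (fuel : Nat) (seen : PySem.Set Int) (op_idx acc : Int), 0 ≤ op_idx →
      run_until_cycle_loop program fuel acc seen op_idx =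
        ((acc - run_until_cycle_sumAcc program seen)
            + run_until_cycle_sumAcc program (run_until_cycle_walk program fuel seen op_idx).1,
         (run_until_cycle_walk program fuel seen op_idx).1,
         (run_until_cycle_walk program fuel seen op_idx).2 == (program.length : Int)) := by
  intro fuel
  induction fuel with
  | zero =>
    intro seen op_idx acc _
    simp [run_until_cycle_loop, run_until_cycle_walk]
  | succ fuel ih =>
    intro seen op_idx acc h0
    by_cases hc : op_idx < (program.length : Int) ∧ op_idx ∉ seen
    · have hlt : op_idx.toNat < program.length := by omega
      rcases hpa : program[op_idx.toNat] with ⟨op, arg⟩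
      have hg : PySem.List.pyGet? program op_idx = some (op, arg) := by
        rw [PySem.List.pyGet?_eq_some_getElem program h0 hc.1, hpa]
      have hmem : ((op, arg), op_idx.toNat) ∈ program.zipIdx :=
        List.mem_zipIdx_iff_getElem?.mpr (by simp [hlt, hpa])
      have hs := sumAcc_add program seen op_idx hc.2
      rw [hg] at hs
      have hadd : PySem.Set.add seen op_idx = seen ++ [op_idx] := by
        simp [PySem.Set.add, hc.2]
      simp [PySem.Set.add, hc.2] at hs
      by_cases hj : op = "jmp"
      · have hnn : 0 ≤ op_idx + arg := by
          have := hpre _ hmem hj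
          simp only at this
          omega
        subst hj
        have ih' := fun a => ih (PySem.Set.add seen op_idx) (op_idx + arg) a hnn
        simp only [hadd] at ih'
        simp only [run_until_cycle_loop, run_until_cycle_walk]
        simp [hc.1, hc.2, hg, hs, ih']
      · have hnn1 : 0 ≤ op_idx + 1 := by omega
        by_cases ha : op = "acc"
        · subst ha
          have ih' := fun a => ih (PySem.Set.add seen op_idx) (op_idx + 1) a hnn1
          simp only [hadd] at ih'
          simp only [run_until_cycle_loop, run_until_cycle_walk]
          simp [hc.1, hc.2, hg, hs, ih']
        · by_cases hn : op = "nop"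
          · subst hn
            have ih' := fun a => ih (PySem.Set.add seen op_idx) (op_idx + 1) a hnn1
            simp only [hadd] at ih'
            simp only [run_until_cycle_loop, run_until_cycle_walk]
            simp [hc.1, hc.2, hg, hs, ih']
          · have ih' := fun a => ih (PySem.Set.add seen op_idx) op_idx a h0
            simp only [hadd] at ih'
            simp only [run_until_cycle_loop, run_until_cycle_walk]
            simp [hc.1, hc.2, hg, hs, ih', hj, ha, hn]
    · simp only [run_until_cycle_loop, run_until_cycle_walk]
      simp [hc]

-- ===== VERDICT (by name: the statement is the Claim_ definition above) =====
theorem run_until_cycle_spec : Claim_equal_run_until_cycle := by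
  intro program _ hpre
  unfold Spec_run_until_cycle run_until_cycle run_until_cycle_alt
  rw [run_until_cycle_loop_eq_walk program hpre _ _ _ _ le_rfl]
  simp [run_until_cycle_sumAcc, PySem.Set.empty]
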